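-- pv_equiv track=rewrite | github.com/mishra-atul5001/365-Days-of-Python-and-ML | Bonus Problem (Lido Learning Problem).py | list_min_replacement
-- ===== SOURCE A (Python) =====
-- def list_min_replacement(nums):
--     nums_min = nums [0]
--
--     nums[0] = 0
--     for i in range(1,len(nums)):
--         if nums_min < nums[i]:
--             nums[i] = nums_min
--         elif nums_min >= nums[i]:
--             nums[i],nums_min = nums_min,nums[i]
--     return nums
-- ===== SOURCE B (Python) =====
-- def list_min_replacement(nums):
--     # Build the table of prefix minima of the ORIGINAL list, then write it back shifted.
--     prefix_mins = [min(nums[:i]) for i in range(1, len(nums))]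
--     nums[0] = 0
--     nums[1:] = prefix_mins
--     return nums
-- ===== Notes on version B (the rewrite author's own statement) =====
-- stated objective: alternative
-- what changed: B first builds the whole prefix-minimum table with the builtin min over list slices and then slice-assigns it back shifted by one, instead of A's single in-place scan that maintains a running-min scalar with a conditional swap at each index.
import Mathlib
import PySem

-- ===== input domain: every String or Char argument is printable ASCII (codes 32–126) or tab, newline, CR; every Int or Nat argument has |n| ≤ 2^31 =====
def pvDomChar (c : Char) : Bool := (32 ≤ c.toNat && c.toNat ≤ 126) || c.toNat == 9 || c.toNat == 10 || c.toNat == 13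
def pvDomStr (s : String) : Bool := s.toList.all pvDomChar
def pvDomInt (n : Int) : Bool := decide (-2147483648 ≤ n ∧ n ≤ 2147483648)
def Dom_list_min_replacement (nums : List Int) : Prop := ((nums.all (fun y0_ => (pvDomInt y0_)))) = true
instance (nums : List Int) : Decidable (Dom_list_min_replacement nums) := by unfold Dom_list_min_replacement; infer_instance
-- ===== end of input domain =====

-- B replaces A's in-place running-min-with-swap scan by building a prefix-minimum table
-- (builtin min over slices) and slice-assigning it back shifted; return value equivalence only
-- (both Pythons mutate the argument the same way on the covered inputs).

-- ===== PORT A =====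
-- one iteration of A's loop body: state = (nums, nums_min)
def stepA (st : List Int × Int) (i : Int) : List Int × Int :=
  let ns := st.1
  let m := st.2
  let v := PySem.List.pyGetD ns i 0
  if m < v then (PySem.List.pySetD ns i m, m)
  else if m ≥ v then (PySem.List.pySetD ns i m, v)
  else st

def list_min_replacement (nums : List Int) : List Int :=
  match PySem.List.pyGet? nums 0 with
  | none => []   -- IndexError on the empty list; excluded by Pre_
  | some nums_min =>
    let nums := PySem.List.pySetD nums 0 0
    ((PySem.List.pyRange 1 (nums.length : Int) 1).foldl stepA (nums, nums_min)).1

-- ===== PORT B =====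
def list_min_replacement_alt (nums : List Int) : List Int :=
  -- prefix_mins = [min(nums[:i]) for i in range(1, len(nums))]
  let prefixMins := (PySem.List.pyRange 1 (nums.length : Int) 1).map
    (fun i => (PySem.List.min? (PySem.List.slice nums none (some i)) (fun x => x)).getD 0)
  -- nums[0] = 0  (IndexError on [] — excluded by Pre_); nums[1:] = prefix_mins
  let nums1 := PySem.List.pySetD nums 0 0
  PySem.List.slice nums1 none (some 1) ++ prefixMins

-- ===== PRECONDITION & SPEC =====
-- A (and B) raise IndexError on the empty list; Pre_ excludes exactly that input.
def Pre_list_min_replacement (nums : List Int) : Prop := nums ≠ []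
instance (nums : List Int) : Decidable (Pre_list_min_replacement nums) := by
  unfold Pre_list_min_replacement; infer_instance
def pvWitness_list_min_replacement : List Int := [3, 1, 4]

def Spec_list_min_replacement (nums : List Int) (out : List Int) : Prop := out = list_min_replacement_alt nums
instance (nums : List Int) (out : List Int) : Decidable (Spec_list_min_replacement nums out) := by unfold Spec_list_min_replacement; infer_instance

-- ===== CLAIM (what is proved, stated in full; the proofs are below) =====
def Claim_equal_list_min_replacement : Prop := ∀ (nums : List Int), Dom_list_min_replacement nums → Pre_list_min_replacement nums → Spec_list_min_replacement nums (list_min_replacement nums)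

-- ===== LEMMAS AND PROOFS =====

-- the common value: running prefix minima, seeded with m
def outMins (m : Int) : List Int → List Int
  | [] => []
  | v :: t => m :: outMins (min m v) t

lemma set_append_cons (pre : List Int) (v m : Int) (t : List Int) :
    (pre ++ v :: t).set pre.length m = pre ++ m :: t := by
  induction pre with
  | nil => simp
  | cons p ps ih => simp [ih]

lemma getD_append_cons (pre : List Int) (v : Int) (t : List Int) :
    PySem.List.pyGetD (pre ++ v :: t) (pre.length : Int) 0 = v := by
  simp [PySem.List.pyGetD]

lemma loopA (t : List Int) : ∀ (pre : List Int) (m : Int), pre ≠ [] →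
    ((PySem.List.pyRange (pre.length : Int) ((pre.length : Int) + (t.length : Int)) 1).foldl
      stepA (pre ++ t, m)).1 = pre ++ outMins m t := by
  induction t with
  | nil => intro pre m _; simp [PySem.List.pyRange_one_eq_nil, outMins]
  | cons v t ih =>
    intro pre m hpre
    have hlt : (pre.length : Int) < (pre.length : Int) + ((v :: t).length : Int) := by
      simp only [List.length_cons]; push_cast; omega
    rw [PySem.List.pyRange_one_cons hlt, List.foldl_cons]
    have hstep : stepA (pre ++ v :: t, m) (pre.length : Int) = (pre ++ m :: t, min m v) := by
      simp only [stepA, getD_append_cons, PySem.List.pySetD_natCast, set_append_cons]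
      by_cases h : m < v
      · rw [if_pos h, min_eq_left h.le]
      · rw [if_neg h, if_pos (by omega : m ≥ v), min_eq_right (by omega : v ≤ m)]
    rw [hstep]
    have := ih (pre ++ [m]) (min m v) (by simp)
    have hlen : ((pre ++ [m]).length : Int) = (pre.length : Int) + 1 := by simp
    rw [hlen, List.append_assoc, List.singleton_append] at this
    have hb : (pre.length : Int) + ((v :: t).length : Int) = (pre.length : Int) + 1 + (t.length : Int) := by
      simp only [List.length_cons]; push_cast; ring
    rw [hb, this, outMins, List.append_assoc, List.singleton_append]

lemma outMins_eq_map (t : List Int) : ∀ (x : Int),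
    outMins x t = (List.range t.length).map (fun k => (t.take k).foldl min x) := by
  induction t with
  | nil => intro x; simp [outMins]
  | cons v t ih =>
    intro x
    simp only [List.length_cons]
    rw [List.range_succ_eq_map]
    simp only [outMins, List.map_cons, List.take_zero, List.foldl_nil, List.map_map]
    congr 1
    rw [ih (min x v)]
    apply List.map_congr_left
    intro k _
    simp [List.foldl_cons]

lemma alt_tail (x : Int) (t : List Int) :
    (PySem.List.pyRange 1 (((x :: t).length : Nat) : Int) 1).map
      (fun i => (PySem.List.min? (PySem.List.slice (x :: t) none (some i)) (fun y => y)).getD 0)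
    = outMins x t := by
  rw [PySem.List.pyRange_one, List.map_map, outMins_eq_map]
  have hn : ((((x :: t).length : Nat) : Int) - 1).toNat = t.length := by
    simp only [List.length_cons]; omega
  rw [hn]
  apply List.map_congr_left
  intro k hk
  have hslice : PySem.List.slice (x :: t) none (some ((1:Int) + k)) = x :: t.take k := by
    have h : (1:Int) + (k : Int) = (((k + 1 : Nat)) : Int) := by push_cast; ring
    rw [h, PySem.List.slice_to_natCast]
    simp [List.take_succ_cons]
  simp only [Function.comp_apply, hslice, PySem.List.min?_id_cons, Option.getD_some]

lemma setD_zero_cons (x : Int) (t : List Int) :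
    PySem.List.pySetD (x :: t) 0 0 = (0 : Int) :: t := by
  simp [PySem.List.pySetD, PySem.List.pySet?, PySem.List.pyIdx?]

lemma alt_eq (x : Int) (t : List Int) :
    list_min_replacement_alt (x :: t) = 0 :: outMins x t := by
  unfold list_min_replacement_alt
  have h1 : PySem.List.slice ((0:Int) :: t) none (some 1) = [0] := by
    rw [show (1 : Int) = ((1 : Nat) : Int) by norm_num, PySem.List.slice_to_natCast]
    simp
  simp only [setD_zero_cons, h1, alt_tail, List.singleton_append]

-- ===== VERDICT (by name: the statement is the Claim_ definition above) =====
theorem list_min_replacement_spec : Claim_equal_list_min_replacement := by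
  intro nums _ hpre
  unfold Spec_list_min_replacement
  match nums with
  | [] => exact absurd rfl hpre
  | x :: t =>
    rw [alt_eq]
    unfold list_min_replacement
    rw [PySem.List.pyGet?_zero_cons]
    simp only [setD_zero_cons]
    have h := loopA t [0] x (by simp)
    simp only [List.length_singleton, Nat.cast_one, List.singleton_append] at h
    have hlen : ((((0:Int) :: t).length : Nat) : Int) = 1 + (t.length : Int) := by
      simp only [List.length_cons]; push_cast; ring
    rw [hlen]
    exact h
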